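-- pv_equiv track=rewrite | github.com/aglavic/plotpy | plotpy/fio/xrd.py | read_file_header
-- ===== SOURCE A (Python) =====
-- def read_file_header(input_file_lines):
--   '''
--     Read the header of the file.
--
--     :param input_file_lines: List of lines to be evaluated
--
--     :return: The sample name defined in the file or None if the wron filetype.
--   '''
--   if not (input_file_lines[0].startswith(u'#F') and
--           input_file_lines[1].startswith(u'#E') and
--           input_file_lines[2].startswith(u'#D')):
--     return None, None
--   try:
--     line=input_file_lines[3]
--     sample_name=line.split(u'User')[0].split(u' ', 1)[1]
--     # remove characters from keyboard input
--     if u'[D' in sample_name or u'\b' in sample_name: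
--       while u'[D' in sample_name:
--         i=sample_name.index(u'[D')
--         sample_name=sample_name[:i-1]+sample_name[i+3:]
--       while u'\b' in sample_name:
--         i=sample_name.index(u'\b')
--         sample_name=sample_name[:i-1]+sample_name[i+1:]
--     last_comments=u''
--     for line in input_file_lines[4:]:
--       if line.startswith(u'#C'):
--         last_comments+=line
--       elif line.startswith(u'#S'):
--         return sample_name, last_comments
--     return None, None
--   except:
--     return None, None
-- ===== SOURCE B (Python) =====
-- def read_file_header(input_file_lines):
--   '''
--     Read the header of the file.
--
--     :param input_file_lines: List of lines to be evaluated
--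
--     :return: (sample name, last comments) from the header, or (None, None)
--              for the wrong file type.
--   '''
--   header = input_file_lines[:3]
--   if len(header) < 3 or any(not l.startswith(p)
--                             for l, p in zip(header, (u'#F', u'#E', u'#D'))):
--     return None, None
--   if len(input_file_lines) < 4:
--     return None, None
--   parts = input_file_lines[3].split(u'User')[0].split(u' ', 1)
--   if len(parts) < 2:
--     return None, None
--   found = False
--   comments = u''
--   for line in reversed(input_file_lines[4:]):
--     if line.startswith(u'#S'):
--       found = True
--       comments = u''
--     elif found and line.startswith(u'#C'):
--       comments = line + comments
--   if not found:
--     return None, None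
--   return parts[1], comments
-- ===== Notes on version B (the rewrite author's own statement) =====
-- stated objective: alternative
-- what changed: B replaces the try/except with explicit length checks (so short or malformed headers return (None, None) instead of raising or falling through an exception handler), checks the three guard prefixes by zipping the first three lines against a tuple of prefixes, and collects the comments in a single reverse pass with a reset-at-'#S' accumulator instead of A's forward early-exit accumulating loop; the terminal-escape cleanup block is dropped because the ESC and backspace characters that trigger it lie outside the printable-ASCII input domain the claim covers.
import Mathlib
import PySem

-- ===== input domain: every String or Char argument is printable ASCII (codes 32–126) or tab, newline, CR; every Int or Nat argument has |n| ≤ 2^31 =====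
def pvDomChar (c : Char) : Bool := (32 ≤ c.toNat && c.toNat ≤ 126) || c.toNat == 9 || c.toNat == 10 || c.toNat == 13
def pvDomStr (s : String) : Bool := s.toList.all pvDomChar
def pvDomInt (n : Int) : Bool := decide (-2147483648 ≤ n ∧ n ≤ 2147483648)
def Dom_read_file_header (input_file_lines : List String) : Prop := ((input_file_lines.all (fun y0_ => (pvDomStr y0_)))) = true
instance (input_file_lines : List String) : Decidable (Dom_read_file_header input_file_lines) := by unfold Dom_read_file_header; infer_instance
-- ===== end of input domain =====

-- B replaces A's try/except and forward early-exit comment loop by explicit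
-- length checks, a zip-against-prefixes guard, and a single reverse pass with a
-- reset-at-'#S' accumulator; objective: alternative (same cost). The return
-- value is the subject of the claim; A mutates nothing.


-- ===== PORT A =====
-- A's two keyboard-cleanup while-loops. The Python loops can diverge (removing
-- '\x1b[D' at index 0 can grow the string), so the recursion carries fuel that
-- merely makes the same computation total; the branch needs an ESC or
-- backspace character, which the printable-ASCII domain excludes.
def pvCleanEscA : Nat → String → String
  | 0, s => s
  | fuel+1, s =>
    if PySem.Str.isIn "\x1b[D" s then
      let i : Int := PySem.Str.find s "\x1b[D"
      pvCleanEscA fuel (String.ofList ((PySem.Str.slice s none (some (i-1))).toList ++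
                                  (PySem.Str.slice s (some (i+3)) none).toList))
    else s

def pvCleanBsA : Nat → String → String
  | 0, s => s
  | fuel+1, s =>
    if PySem.Str.isIn "\x08" s then
      let i : Int := PySem.Str.find s "\x08"
      pvCleanBsA fuel (String.ofList ((PySem.Str.slice s none (some (i-1))).toList ++
                                  (PySem.Str.slice s (some (i+1)) none).toList))
    else s

-- line.split('User')[0].split(' ', 1)[1] plus the cleaning block; none = the
-- IndexError of [1] when the first piece has no space (caught by A's 'except').
-- split('User')[0]: a Python str.split result is never empty, so getD 0 "" is exact.
def pvSampleNameA? (line : String) : Option String :=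
  let first := ((PySem.Str.split? line "User").getD []).getD 0 ""
  match PySem.List.pyGet? ((PySem.Str.splitMax? first " " 1).getD []) 1 with
  | none => none
  | some sn =>
      if PySem.Str.isIn "\x1b[D" sn || PySem.Str.isIn "\x08" sn then
        some (pvCleanBsA sn.length (pvCleanEscA sn.length sn))
      else some sn

-- A's comment loop: accumulate '#C' lines, return at the first '#S' line.
def pvLoopA : List String → String → String → Option String × Option String
  | [], _, _ => (none, none)
  | line :: rest, sn, lc =>
    if PySem.Str.startswith line "#C" then pvLoopA rest sn (lc ++ line)
    else if PySem.Str.startswith line "#S" then (some sn, some lc)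
    else pvLoopA rest sn lc

-- the guard reads l[0], l[1], l[2] outside the try (short-circuit left to right);
-- Pre_ excludes exactly the short lists on which an index it reaches raises,
-- so the "" defaults are never compared there.
def read_file_header (input_file_lines : List String) : Option String × Option String :=
  if !(PySem.Str.startswith (input_file_lines.getD 0 "") "#F" &&
       PySem.Str.startswith (input_file_lines.getD 1 "") "#E" &&
       PySem.Str.startswith (input_file_lines.getD 2 "") "#D") then (none, none)
  else
    match PySem.List.pyGet? input_file_lines 3 with
    | none => (none, none)          -- IndexError on l[3], caught
    | some line =>
      match pvSampleNameA? line with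
      | none => (none, none)        -- IndexError in the split chain, caught
      | some sn =>
        pvLoopA (PySem.List.slice input_file_lines (some 4) none) sn ""

-- ===== PORT B =====
-- Source B's reverse loop body: 'for line in reversed(tail)' over state (found, comments)
def pvStepB (st : Bool × String) (line : String) : Bool × String :=
  if PySem.Str.startswith line "#S" then (true, "")
  else if st.1 && PySem.Str.startswith line "#C" then (st.1, line ++ st.2)
  else st

def read_file_header_alt (input_file_lines : List String) : Option String × Option String :=
  let header := PySem.List.slice input_file_lines none (some 3)
  if header.length < 3 ||
     (header.zip ["#F", "#E", "#D"]).any (fun lp => !PySem.Str.startswith lp.1 lp.2) then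
    (none, none)
  else if input_file_lines.length < 4 then (none, none)
  else
    let parts := (PySem.Str.splitMax?
      (((PySem.Str.split? (input_file_lines.getD 3 "") "User").getD []).getD 0 "") " " 1).getD []
    if parts.length < 2 then (none, none)
    else
      let r := (PySem.List.slice input_file_lines (some 4) none).reverse.foldl pvStepB (false, "")
      if !r.1 then (none, none)
      else (some (parts.getD 1 ""), some r.2)

-- ===== PRECONDITION & SPEC =====
-- Pre_ excludes exactly the inputs on which the Python A raises IndexError while
-- evaluating the guard (lists shorter than 3 whose present lines pass the
-- short-circuiting prefix tests); A returns on every input admitted here.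
def Pre_read_file_header (input_file_lines : List String) : Prop :=
  3 ≤ input_file_lines.length ∨
  (1 ≤ input_file_lines.length ∧
     PySem.Str.startswith (input_file_lines.getD 0 "") "#F" = false) ∨
  (2 ≤ input_file_lines.length ∧
     PySem.Str.startswith (input_file_lines.getD 0 "") "#F" = true ∧
     PySem.Str.startswith (input_file_lines.getD 1 "") "#E" = false)
instance (input_file_lines : List String) : Decidable (Pre_read_file_header input_file_lines) := by unfold Pre_read_file_header; infer_instance

def pvWitness_read_file_header : List String :=
  ["#F f", "#E 1", "#D d", "#S1 sample", "#C c", "#S 1"]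

def Spec_read_file_header (input_file_lines : List String) (out : Option String × Option String) : Prop := out = read_file_header_alt input_file_lines
instance (input_file_lines : List String) (out : Option String × Option String) : Decidable (Spec_read_file_header input_file_lines out) := by unfold Spec_read_file_header; infer_instance

-- ===== CLAIM (what is proved, stated in full; the proofs are below) =====
def Claim_equal_read_file_header : Prop := ∀ (input_file_lines : List String), Dom_read_file_header input_file_lines → Pre_read_file_header input_file_lines → Spec_read_file_header input_file_lines (read_file_header input_file_lines)
-- ===== LEMMAS AND PROOFS =====

-- every character of every piece produced by Chars.splitOn.go comes from the
-- remaining input, the current piece, or an already finished piece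
theorem pv_splitOn_go_subset (sep : List Char) :
    ∀ (fuel : Nat) (l cur : List Char) (acc : List (List Char))
      (piece : List Char), piece ∈ PySem.Chars.splitOn.go sep fuel l cur acc →
      ∀ c ∈ piece, c ∈ l ∨ c ∈ cur ∨ ∃ p ∈ acc, c ∈ p := by
  intro fuel
  induction fuel with
  | zero =>
    intro l cur acc piece hp c hc
    simp [PySem.Chars.splitOn.go] at hp
    rcases hp with h | h
    · exact Or.inr (Or.inr ⟨piece, h, hc⟩)
    · subst h; simp at hc
      rcases hc with h | h
      · exact Or.inr (Or.inl h)
      · exact Or.inl h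
  | succ f ihf =>
    intro l cur acc piece hp c hc
    cases l with
    | nil =>
      simp [PySem.Chars.splitOn.go] at hp
      rcases hp with h | h
      · exact Or.inr (Or.inr ⟨piece, h, hc⟩)
      · subst h; simp at hc; exact Or.inr (Or.inl hc)
    | cons a rest =>
      rw [PySem.Chars.splitOn.go] at hp
      split at hp
      · rcases ihf _ _ _ _ hp c hc with h | h | ⟨p, hpm, hcp⟩
        · exact Or.inl (List.mem_of_mem_drop h)
        · simp at h
        · rcases List.mem_cons.mp hpm with h | h
          · subst h; simp at hcp; exact Or.inr (Or.inl hcp)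
          · exact Or.inr (Or.inr ⟨p, h, hcp⟩)
      · rcases ihf _ _ _ _ hp c hc with h | h | ⟨p, hpm, hcp⟩
        · exact Or.inl (List.mem_cons_of_mem _ h)
        · rcases List.mem_cons.mp h with h | h
          · subst h; exact Or.inl List.mem_cons_self
          · exact Or.inr (Or.inl h)
        · exact Or.inr (Or.inr ⟨p, hpm, hcp⟩)

theorem pv_splitOnMax_go_subset (sep : List Char) :
    ∀ (fuel : Nat) (m : Nat) (l cur : List Char) (acc : List (List Char))
      (piece : List Char), piece ∈ PySem.Chars.splitOnMax.go sep fuel m l cur acc →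
      ∀ c ∈ piece, c ∈ l ∨ c ∈ cur ∨ ∃ p ∈ acc, c ∈ p := by
  intro fuel
  induction fuel with
  | zero =>
    intro m l cur acc piece hp c hc
    simp [PySem.Chars.splitOnMax.go] at hp
    rcases hp with h | h
    · exact Or.inr (Or.inr ⟨piece, h, hc⟩)
    · subst h; simp at hc
      rcases hc with h | h
      · exact Or.inr (Or.inl h)
      · exact Or.inl h
  | succ f ihf =>
    intro m l cur acc piece hp c hc
    cases l with
    | nil =>
      simp [PySem.Chars.splitOnMax.go] at hp
      rcases hp with h | h
      · exact Or.inr (Or.inr ⟨piece, h, hc⟩)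
      · subst h; simp at hc; exact Or.inr (Or.inl hc)
    | cons a rest =>
      rw [PySem.Chars.splitOnMax.go] at hp
      split at hp
      · simp at hp
        rcases hp with h | h
        · exact Or.inr (Or.inr ⟨piece, h, hc⟩)
        · subst h; simp at hc
          rcases hc with h | h
          · exact Or.inr (Or.inl h)
          · exact Or.inl (List.mem_cons.mpr h)
      · split at hp
        · rcases ihf _ _ _ _ _ hp c hc with h | h | ⟨p, hpm, hcp⟩
          · exact Or.inl (List.mem_of_mem_drop h)
          · simp at h
          · rcases List.mem_cons.mp hpm with h | h
            · subst h; simp at hcp; exact Or.inr (Or.inl hcp)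
            · exact Or.inr (Or.inr ⟨p, h, hcp⟩)
        · rcases ihf _ _ _ _ _ hp c hc with h | h | ⟨p, hpm, hcp⟩
          · exact Or.inl (List.mem_cons_of_mem _ h)
          · rcases List.mem_cons.mp h with h | h
            · subst h; exact Or.inl List.mem_cons_self
            · exact Or.inr (Or.inl h)
          · exact Or.inr (Or.inr ⟨p, hpm, hcp⟩)

-- characters of any piece of s.split(sep) are characters of s
theorem pv_splitOn_subset (s sep piece : List Char)
    (h : piece ∈ PySem.Chars.splitOn s sep) : ∀ c ∈ piece, c ∈ s := by
  intro c hc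
  rcases pv_splitOn_go_subset sep _ _ _ _ _ h c hc with h | h | ⟨p, hp, _⟩
  · exact h
  · simp at h
  · simp at hp

theorem pv_splitOnMax_subset (s sep piece : List Char) (m : Int)
    (h : piece ∈ PySem.Chars.splitOnMax s sep m) : ∀ c ∈ piece, c ∈ s := by
  intro c hc
  unfold PySem.Chars.splitOnMax at h
  split at h
  · exact pv_splitOn_subset s sep piece h c hc
  · rcases pv_splitOnMax_go_subset sep _ _ _ _ _ _ h c hc with h | h | ⟨p, hp, _⟩
    · exact h
    · simp at h
    · simp at hp

-- a successful Python indexing returns an element of the list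
theorem pv_pyGet?_mem {α : Type} (xs : List α) (i : Int) (x : α)
    (h : PySem.List.pyGet? xs i = some x) : x ∈ xs := by
  unfold PySem.List.pyGet? at h
  cases hk : PySem.List.pyIdx? xs.length i with
  | none => rw [hk] at h; simp at h
  | some k => rw [hk] at h; simp at h; exact List.mem_of_getElem? h

-- under Dom, the sample name extracted by the split chain contains no ESC and
-- no backspace, so A's cleaning branch is never taken
theorem pv_sampleNameA_raw (line : String) (hd : pvDomStr line = true) :
    pvSampleNameA? line =
      PySem.List.pyGet? ((PySem.Str.splitMax?
        (((PySem.Str.split? line "User").getD []).getD 0 "") " " 1).getD []) 1 := by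
  have hdom : ∀ c ∈ line.toList, pvDomChar c = true := by
    simpa [pvDomStr, List.all_eq_true] using hd
  have hsub1 : ∀ c ∈ (((PySem.Str.split? line "User").getD []).getD 0 "").toList,
      c ∈ line.toList := by
    have hs : PySem.Str.split? line "User" =
        some ((PySem.Chars.splitOn line.toList "User".toList).map String.ofList) := by
      simp [PySem.Str.split?, PySem.Chars.split?]
    rw [hs, Option.getD_some]
    rw [List.getD_eq_getElem?_getD, List.getElem?_map]
    cases hq : (PySem.Chars.splitOn line.toList "User".toList)[0]? with
    | none => simp
    | some q =>
      simp only [Option.map_some, Option.getD_some]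
      intro c hc
      rw [String.toList_ofList] at hc
      exact pv_splitOn_subset _ _ _ (List.mem_of_getElem? hq) c hc
  unfold pvSampleNameA?
  dsimp only
  cases hsn : PySem.List.pyGet? ((PySem.Str.splitMax?
      (((PySem.Str.split? line "User").getD []).getD 0 "") " " 1).getD []) 1 with
  | none => rfl
  | some sn =>
    have hsnsub : ∀ c ∈ sn.toList, c ∈ line.toList := by
      have hmem := pv_pyGet?_mem _ _ _ hsn
      have hm : PySem.Str.splitMax?
          (((PySem.Str.split? line "User").getD []).getD 0 "") " " 1 =
          some ((PySem.Chars.splitOnMax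
            (((PySem.Str.split? line "User").getD []).getD 0 "").toList " ".toList 1).map
              String.ofList) := by
        simp [PySem.Str.splitMax?, PySem.Chars.splitMax?]
      rw [hm, Option.getD_some] at hmem
      obtain ⟨q, hq, hqs⟩ := List.mem_map.mp hmem
      intro c hc
      rw [← hqs, String.toList_ofList] at hc
      exact hsub1 c (pv_splitOnMax_subset _ _ _ _ hq c hc)
    have h1 : PySem.Str.isIn "\x1b[D" sn = false := by
      rw [Bool.eq_false_iff]
      intro htr
      have hinf := (PySem.Str.isIn_iff_infix _ _).mp htr
      have hmem : '\x1b' ∈ sn.toList := hinf.subset (by decide)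
      have := hdom _ (hsnsub _ hmem)
      exact absurd this (by decide)
    have h2 : PySem.Str.isIn "\x08" sn = false := by
      rw [Bool.eq_false_iff]
      intro htr
      have hinf := (PySem.Str.isIn_iff_infix _ _).mp htr
      have hmem : '\x08' ∈ sn.toList := hinf.subset (by decide)
      have := hdom _ (hsnsub _ hmem)
      exact absurd this (by decide)
    have h1' : PySem.Chars.isIn ['\x1b', '[', 'D'] sn.toList = false := by simpa using h1
    have h2' : PySem.Chars.isIn ['\x08'] sn.toList = false := by simpa using h2
    simp [h1', h2']

-- no line starts with both "#C" and "#S"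
theorem pv_not_both (s : String)
    (hC : PySem.Str.startswith s "#C" = true)
    (hS : PySem.Str.startswith s "#S" = true) : False := by
  rw [PySem.Str.startswith_eq] at hC hS
  rw [PySem.Chars.startswith_iff] at hC hS
  obtain ⟨t, ht⟩ := hC
  rw [← ht] at hS
  simp [List.prefix_cons_iff] at hS

-- A's forward early-exit loop equals B's reverse fold with reset
theorem pv_loop_eq (tail : List String) (sn : String) : ∀ (acc : String),
    pvLoopA tail sn acc =
      (let r := tail.reverse.foldl pvStepB (false, "")
       if !r.1 then (none, none) else (some sn, some (acc ++ r.2))) := by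
  induction tail with
  | nil => intro acc; simp [pvLoopA]
  | cons h t ih =>
    intro acc
    rw [List.reverse_cons, List.foldl_append]
    dsimp only
    simp only [List.foldl_cons, List.foldl_nil]
    by_cases hS : PySem.Str.startswith h "#S" = true
    · have hC : PySem.Str.startswith h "#C" = false := by
        by_contra hc
        exact pv_not_both h (by revert hc; cases PySem.Str.startswith h "#C" <;> simp) hS
      have hSc : PySem.Chars.startswith h.toList ['#', 'S'] = true := by simpa using hS
      rw [pvLoopA, if_neg (by simpa using hC), if_pos (by simpa using hS)]
      simp [pvStepB, PySem.Str.startswith_eq, hSc]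
    · have hS' : PySem.Str.startswith h "#S" = false := by
        revert hS; cases PySem.Str.startswith h "#S" <;> simp
      have hSc : PySem.Chars.startswith h.toList ['#', 'S'] = false := by simpa using hS'
      by_cases hC : PySem.Str.startswith h "#C" = true
      · have hCc : PySem.Chars.startswith h.toList ['#', 'C'] = true := by simpa using hC
        rw [pvLoopA, if_pos (by simpa using hC), ih (acc ++ h)]
        cases hr : (List.foldl pvStepB (false, "") t.reverse) with
        | mk b str =>
          cases b <;>
            simp [pvStepB, PySem.Str.startswith_eq, hSc, hCc, String.append_assoc]
      · have hC' : PySem.Str.startswith h "#C" = false := by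
          revert hC; cases PySem.Str.startswith h "#C" <;> simp
        have hCc : PySem.Chars.startswith h.toList ['#', 'C'] = false := by simpa using hC'
        rw [pvLoopA, if_neg (by simpa using hC'), if_neg (by simpa using hS'), ih acc]
        cases hr : (List.foldl pvStepB (false, "") t.reverse) with
        | mk b str =>
          cases b <;> simp [pvStepB, PySem.Str.startswith_eq, hSc, hCc]

-- ===== VERDICT (by name: the statement is the Claim_ definition above) =====
-- Python indexing at the literal indices the ports use
theorem pv_pyGet?_one {α : Type} (xs : List α) : PySem.List.pyGet? xs 1 = xs[1]? := by
  simpa using PySem.List.pyGet?_natCast xs 1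

theorem pv_pyGet?_three {α : Type} (xs : List α) : PySem.List.pyGet? xs 3 = xs[3]? := by
  simpa using PySem.List.pyGet?_natCast xs 3

-- from the sample-name stage on, A's match/loop equals B's length-check/reverse fold
theorem pv_tail_eq (tail : List String) (line : String) (hdd : pvDomStr line = true) :
    (match pvSampleNameA? line with
     | none => ((none : Option String), (none : Option String))
     | some sn => pvLoopA tail sn "") =
    (if ((PySem.Str.splitMax? (((PySem.Str.split? line "User").getD []).getD 0 "") " " 1).getD
        []).length < 2 then (none, none)
     else
       let r := tail.reverse.foldl pvStepB (false, "")
       if !r.1 then (none, none)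
       else (some (((PySem.Str.splitMax?
         (((PySem.Str.split? line "User").getD []).getD 0 "") " " 1).getD []).getD 1 ""),
         some r.2)) := by
  rw [pv_sampleNameA_raw line hdd]
  cases hp : PySem.List.pyGet? ((PySem.Str.splitMax?
      (((PySem.Str.split? line "User").getD []).getD 0 "") " " 1).getD []) 1 with
  | none =>
    have hl : ((PySem.Str.splitMax?
        (((PySem.Str.split? line "User").getD []).getD 0 "") " " 1).getD []).length < 2 := by
      rw [pv_pyGet?_one] at hp
      have := List.getElem?_eq_none_iff.mp hp
      omega
    rw [if_pos hl]
  | some sn =>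
    rw [pv_pyGet?_one] at hp
    have hl : ¬ (((PySem.Str.splitMax?
        (((PySem.Str.split? line "User").getD []).getD 0 "") " " 1).getD []).length < 2) := by
      obtain ⟨hlt, -⟩ := List.getElem?_eq_some_iff.mp hp
      omega
    have hgd : ((PySem.Str.splitMax?
        (((PySem.Str.split? line "User").getD []).getD 0 "") " " 1).getD []).getD 1 "" = sn := by
      rw [List.getD_eq_getElem?_getD, hp]
      rfl
    have hred : (match some sn with
      | none => ((none : Option String), (none : Option String))
      | some sn => pvLoopA tail sn "") = pvLoopA tail sn "" := rfl
    rw [hred, if_neg hl, pv_loop_eq, hgd]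
    dsimp only
    cases hr : (List.foldl pvStepB (false, "") tail.reverse) with
    | mk bb str => cases bb <;> simp

theorem read_file_header_spec : Claim_equal_read_file_header := by
  intro l hdm hpre
  unfold Spec_read_file_header read_file_header read_file_header_alt
  rcases l with _ | ⟨a, _ | ⟨b, _ | ⟨c, t⟩⟩⟩
  · exact absurd hpre (by unfold Pre_read_file_header; simp)
  · -- one line: Pre_ says its '#F' test fails, both sides return (none, none)
    unfold Pre_read_file_header at hpre
    simp at hpre
    simp [PySem.List.slice, hpre]
  · -- two lines: Pre_ says a prefix test among the first two fails
    unfold Pre_read_file_header at hpre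
    simp at hpre
    rcases hpre with h | ⟨h1, h2⟩
    · simp [PySem.List.slice, h]
    · simp [PySem.List.slice, h1, h2]
  · -- three or more lines
    have hsl : PySem.List.slice (a :: b :: c :: t) none (some 3) = [a, b, c] := by
      simp [PySem.List.slice]
    rw [hsl]
    by_cases hg : (PySem.Str.startswith a "#F" && PySem.Str.startswith b "#E" &&
        PySem.Str.startswith c "#D") = true
    · simp only [Bool.and_eq_true] at hg
      obtain ⟨⟨ha, hb⟩, hc⟩ := hg
      have ha' : PySem.Chars.startswith a.toList ['#', 'F'] = true := by simpa using ha
      have hb' : PySem.Chars.startswith b.toList ['#', 'E'] = true := by simpa using hb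
      have hc' : PySem.Chars.startswith c.toList ['#', 'D'] = true := by simpa using hc
      rw [if_neg (by simp [List.getD, ha', hb', hc'])]
      rw [if_neg (by simp [ha', hb', hc'])]
      cases t with
      | nil =>
        rw [show PySem.List.pyGet? [a, b, c] (3 : Int) = none from rfl,
          if_pos (by simp)]
      | cons d t' =>
        have h3 : PySem.List.pyGet? (a :: b :: c :: d :: t') (3 : Int) = some d := by
          rw [pv_pyGet?_three]
          rfl
        rw [h3]
        have hdd : pvDomStr d = true := by
          simp [Dom_read_file_header] at hdm
          tauto
        have hlen : ¬ ((a :: b :: c :: d :: t').length < 4) := by simp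
        rw [if_neg hlen]
        have hget : (a :: b :: c :: d :: t').getD 3 "" = d := rfl
        rw [hget]
        exact pv_tail_eq _ d hdd
    · -- guard fails: both sides return (none, none)
      cases hxa : PySem.Str.startswith a "#F" <;>
        cases hxb : PySem.Str.startswith b "#E" <;>
        cases hxc : PySem.Str.startswith c "#D" <;>
        simp_all [List.getD]
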